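-- pv_equiv track=rewrite | github.com/viktor-grunwaldt/wdp | lista02/zad2.py | koperta
-- ===== SOURCE A (Python) =====
-- def koperta(n:int) -> str:
--     img = ""
--     for i in range(2*n+1):
--         for j in range(2*n+1):
--             img += '*' if (
--                        i*j  == 0       # góra + lewo
--                     or i    == j       # skos z góry
--                     or j+i  == 2*n     # skos z dołu
--                     or i    == 2*n     # dół
--                     or j    == 2*n     # prawo
--                     ) else ' '
--         img += '\n'
--     return img
-- ===== SOURCE B (Python) =====
-- def koperta(n: int) -> str:
--     m = 2 * n + 1
--     if m <= 0:
--         return ""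
--     rows = []
--     for i in range(m):
--         if i == 0 or i == m - 1:
--             row = ['*'] * m
--         else:
--             row = [' '] * m
--             for j in (0, i, m - 1 - i, m - 1):
--                 row[j] = '*'
--         rows.append(''.join(row) + '\n')
--     return ''.join(rows)
-- ===== Notes on version B (the rewrite author's own statement) =====
-- stated objective: alternative
-- what changed: Instead of testing a five-clause per-cell predicate for every cell while concatenating characters, B builds each row as a mutable list of spaces (or a full row of stars for the top and bottom border) and draws the envelope's lines by setting the left edge, the two diagonal positions and the right edge, then joins the rows.
import Mathlib
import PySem

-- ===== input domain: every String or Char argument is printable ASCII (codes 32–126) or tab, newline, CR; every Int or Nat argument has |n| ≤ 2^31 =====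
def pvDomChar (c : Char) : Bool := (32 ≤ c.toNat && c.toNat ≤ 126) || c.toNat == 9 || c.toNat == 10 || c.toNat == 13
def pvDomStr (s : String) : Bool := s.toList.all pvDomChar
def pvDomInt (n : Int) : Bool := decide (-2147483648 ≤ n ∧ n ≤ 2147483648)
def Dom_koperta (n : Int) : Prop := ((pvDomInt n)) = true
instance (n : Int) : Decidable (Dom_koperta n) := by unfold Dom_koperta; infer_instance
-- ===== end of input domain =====

-- B draws the envelope line-by-line into per-row character lists (borders as full star
-- rows, interior rows by setting the four line positions) instead of testing A's
-- five-clause per-cell predicate; alternative decomposition, same cost.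

-- ===== PORT A =====
-- img accumulated as List Char (wrapped into a String at the end; Lean's String.append
-- is opaque to the kernel, so the port works on the list of characters — step for step
-- the same concatenations as the Python)
def kopertaChars (n : Int) : List Char :=
  (PySem.List.pyRange 0 (2*n+1) 1).foldl (fun img i =>
    ((PySem.List.pyRange 0 (2*n+1) 1).foldl (fun img2 j =>
      img2 ++ [if i*j = 0 ∨ i = j ∨ j+i = 2*n ∨ i = 2*n ∨ j = 2*n then '*' else ' ']) img)
    ++ ['\n']) []

def koperta (n : Int) : String := String.ofList (kopertaChars n)

-- ===== PORT B =====
-- one row of the envelope: border rows are all stars; an interior row i starts as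
-- spaces and gets a star set at positions 0, i, m-1-i and m-1 (Source B's inner loop)
def kopertaAltRow (m i : Nat) : List Char :=
  if i = 0 ∨ i = m - 1 then List.replicate m '*'
  else ((((List.replicate m ' ').set 0 '*').set i '*').set (m - 1 - i) '*').set (m - 1) '*'

def koperta_alt (n : Int) : String :=
  let m := 2*n + 1
  if m ≤ 0 then ""
  else String.ofList (((List.range m.toNat).map (fun i => kopertaAltRow m.toNat i ++ ['\n'])).flatten)

-- ===== PRECONDITION & SPEC =====
def Spec_koperta (n : Int) (out : String) : Prop := out = koperta_alt n
instance (n : Int) (out : String) : Decidable (Spec_koperta n out) := by unfold Spec_koperta; infer_instance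

-- ===== CLAIM (what is proved, stated in full; the proofs are below) =====
def Claim_equal_koperta : Prop := ∀ (n : Int), Dom_koperta n → Spec_koperta n (koperta n)

-- ===== LEMMAS AND PROOFS =====

-- A's per-cell predicate, read over Nat row/column indices, is exactly membership in
-- one of B's five lines (M = 2n+1 = grid side)
lemma koperta_cond_iff (n : Int) (hn : 0 ≤ n) (i j : Nat)
    (hM : ((2*n+1).toNat : Int) = 2*n+1) :
    ((i:Int)*(j:Int) = 0 ∨ (i:Int) = (j:Int) ∨ (j:Int)+(i:Int) = 2*n ∨ (i:Int) = 2*n ∨ (j:Int) = 2*n)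
    ↔ (i = 0 ∨ j = 0 ∨ i = j ∨ j + i = (2*n+1).toNat - 1 ∨ i = (2*n+1).toNat - 1 ∨ j = (2*n+1).toNat - 1) := by
  rw [mul_eq_zero]
  constructor <;> intro h <;> omega

-- the j-th entry of B's interior row, by unfolding the four `set`s
lemma kopertaAltRow_getElem (m i j : Nat) (hj : j < m) (hi : ¬ (i = 0 ∨ i = m - 1)) :
    (kopertaAltRow m i)[j]'(by simp [kopertaAltRow, hi]; omega) =
      if m - 1 = j then '*' else if m - 1 - i = j then '*' else if i = j then '*'
      else if 0 = j then '*' else ' ' := by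
  simp only [kopertaAltRow, if_neg hi]
  rw [List.getElem_set, List.getElem_set, List.getElem_set, List.getElem_set]
  split_ifs <;> simp [List.getElem_replicate]

-- row i of A's output equals B's row i
lemma koperta_row_eq (n : Int) (hn : 0 ≤ n) (i : Nat) (hi : i < (2*n+1).toNat) :
    (List.range (2*n+1).toNat).map (fun j : Nat =>
      if (i:Int)*(j:Int) = 0 ∨ (i:Int) = (j:Int) ∨ (j:Int)+(i:Int) = 2*n ∨ (i:Int) = 2*n ∨ (j:Int) = 2*n
      then '*' else ' ')
    = kopertaAltRow (2*n+1).toNat i := by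
  have hM : ((2*n+1).toNat : Int) = 2*n+1 := Int.toNat_of_nonneg (by omega)
  apply List.ext_getElem
  · simp [kopertaAltRow]; split_ifs <;> simp
  · intro j hj₁ hj₂
    have hj : j < (2*n+1).toNat := by simpa using hj₁
    simp only [List.getElem_map, List.getElem_range]
    by_cases hcase : i = 0 ∨ i = (2*n+1).toNat - 1
    · have : (kopertaAltRow (2*n+1).toNat i)[j]'hj₂ = '*' := by
        simp [kopertaAltRow, if_pos hcase, List.getElem_replicate]
      rw [this, if_pos]
      rw [koperta_cond_iff n hn i j hM]
      omega
    · rw [kopertaAltRow_getElem _ _ _ hj hcase]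
      by_cases hP : ((i:Int)*(j:Int) = 0 ∨ (i:Int) = (j:Int) ∨ (j:Int)+(i:Int) = 2*n ∨ (i:Int) = 2*n ∨ (j:Int) = 2*n)
      · rw [if_pos hP]
        rw [koperta_cond_iff n hn i j hM] at hP
        split_ifs <;> first | rfl | omega
      · rw [if_neg hP]
        rw [koperta_cond_iff n hn i j hM] at hP
        split_ifs <;> first | rfl | omega

-- A's nested string-building fold is the concatenation of its rows
lemma foldl_rows (xs ys : List Int) (c : Int → Int → Char) :
    xs.foldl (fun img i => (ys.foldl (fun img2 j => img2 ++ [c i j]) img) ++ ['\n']) []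
    = xs.flatMap (fun i => ys.map (c i) ++ ['\n']) := by
  have hfun : (fun (img : List Char) i => (ys.foldl (fun img2 j => img2 ++ [c i j]) img) ++ ['\n'])
      = fun img i => img ++ (ys.map (c i) ++ ['\n']) := by
    funext img i
    rw [PySem.List.foldl_append_singleton_eq_map, List.append_assoc]
  rw [hfun, List.flatMap_eq_foldl]

lemma kopertaChars_neg (n : Int) (hn : n < 0) : kopertaChars n = [] := by
  have h : ¬ ((0:Int) < 2*n+1) := by omega
  simp [kopertaChars, PySem.List.pyRange, h]

lemma kopertaChars_eq (n : Int) (hn : 0 ≤ n) :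
    kopertaChars n = ((List.range (2*n+1).toNat).map
      (fun i => kopertaAltRow (2*n+1).toNat i ++ ['\n'])).flatten := by
  have hM : ((2*n+1).toNat : Int) = 2*n+1 := Int.toNat_of_nonneg (by omega)
  unfold kopertaChars
  rw [show (2*n+1) = (((2*n+1).toNat : Nat) : Int) from hM.symm,
      PySem.List.pyRange_zero_natCast, foldl_rows, List.flatMap_map]
  simp only [Int.toNat_natCast]
  rw [List.flatMap_def]
  congr 1
  apply List.map_congr_left
  intro i hi
  have hi' : i < (2*n+1).toNat := List.mem_range.mp hi
  congr 1
  rw [List.map_map]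
  exact koperta_row_eq n hn i hi'

-- ===== VERDICT (by name: the statement is the Claim_ definition above) =====
theorem koperta_spec : Claim_equal_koperta := by
  intro n _
  unfold Spec_koperta koperta koperta_alt
  by_cases hn : 0 ≤ n
  · rw [if_neg (by omega), kopertaChars_eq n hn]
  · rw [if_pos (by omega), kopertaChars_neg n (by omega)]
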